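-- pv_equiv track=rewrite | github.com/RepTrak/qa_crt_raw | utils/computations/compute_main.py | get_rolled_unrolled_cols
-- ===== SOURCE A (Python) =====
-- def get_rolled_unrolled_cols(data, with_pulse=True):
--     # Identify (presently) rolled scores
--     q320=[col for col in data if (col.startswith('Q320') and col.endswith('G_Reb'))]
--     q215=[col for col in data if (col.startswith('Q215') and col.endswith('G_Reb'))]
--     q410=[col for col in data if (col.startswith('Q410') and col.endswith('G_Reb'))]
--     q800=[col for col in data if (col.startswith('Q800') and col.endswith('G_Reb'))]
--     if with_pulse:
--         rolled_cols=['Pulse_G_Reb']+q320+q215+q410+q800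
--     else:
--         rolled_cols=q320+q215+q410+q800
--
--     # Identify (presently) unrolled scores - orig
--     oq320=[col for col in data if (col.startswith('orig_q320') and col.endswith('g_reb'))]
--     oq215=[col for col in data if (col.startswith('orig_q215') and col.endswith('g_reb'))]
--     oq410=[col for col in data if (col.startswith('orig_q410') and col.endswith('g_reb'))]
--     oq800=[col for col in data if (col.startswith('orig_q800') and col.endswith('g_reb'))]
--     if with_pulse:
--         unrolled_cols=['orig_pulse_g_reb']+oq320+oq215+oq410+oq800
--     else:
--         unrolled_cols=oq320+oq215+oq410+oq800
--     return(rolled_cols,unrolled_cols)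
-- ===== SOURCE B (Python) =====
-- def _collect(bucket, col, prefix, suffix):
--     if col.startswith(prefix) and col.endswith(suffix):
--         bucket.append(col)
--
--
-- def get_rolled_unrolled_cols(data, with_pulse=True):
--     # One pass over data, classifying each column into its bucket.
--     q320, q215, q410, q800 = [], [], [], []
--     oq320, oq215, oq410, oq800 = [], [], [], []
--     for col in data:
--         _collect(q320, col, 'Q320', 'G_Reb')
--         _collect(q215, col, 'Q215', 'G_Reb')
--         _collect(q410, col, 'Q410', 'G_Reb')
--         _collect(q800, col, 'Q800', 'G_Reb')
--         _collect(oq320, col, 'orig_q320', 'g_reb')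
--         _collect(oq215, col, 'orig_q215', 'g_reb')
--         _collect(oq410, col, 'orig_q410', 'g_reb')
--         _collect(oq800, col, 'orig_q800', 'g_reb')
--     rolled_cols = (['Pulse_G_Reb'] if with_pulse else []) + q320 + q215 + q410 + q800
--     unrolled_cols = (['orig_pulse_g_reb'] if with_pulse else []) + oq320 + oq215 + oq410 + oq800
--     return (rolled_cols, unrolled_cols)
-- ===== Notes on version B (the rewrite author's own statement) =====
-- stated objective: alternative
-- what changed: Replaces A's eight separate list-comprehension scans of data with a single classifying traversal that appends each column to the matching bucket, then concatenates the buckets in the same order.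
import Mathlib
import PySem

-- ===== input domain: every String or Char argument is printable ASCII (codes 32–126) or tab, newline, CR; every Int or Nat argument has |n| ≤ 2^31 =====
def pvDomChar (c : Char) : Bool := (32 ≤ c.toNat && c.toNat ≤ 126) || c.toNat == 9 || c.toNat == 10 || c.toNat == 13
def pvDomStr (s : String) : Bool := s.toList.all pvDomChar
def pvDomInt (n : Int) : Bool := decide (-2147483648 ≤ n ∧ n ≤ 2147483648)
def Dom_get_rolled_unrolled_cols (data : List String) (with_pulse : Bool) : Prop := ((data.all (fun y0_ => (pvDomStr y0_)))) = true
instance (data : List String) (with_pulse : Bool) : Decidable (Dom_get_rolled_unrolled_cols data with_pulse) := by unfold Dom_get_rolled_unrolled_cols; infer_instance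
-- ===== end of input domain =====

-- B replaces A's eight separate filtering scans of data with one classifying traversal
-- that appends each column to its matching bucket (objective: alternative decomposition).


-- ===== PORT A =====
def get_rolled_unrolled_cols (data : List String) (with_pulse : Bool) : List String × List String :=
  let q320 := data.filter (fun col => PySem.Str.startswith col "Q320" && PySem.Str.endswith col "G_Reb")
  let q215 := data.filter (fun col => PySem.Str.startswith col "Q215" && PySem.Str.endswith col "G_Reb")
  let q410 := data.filter (fun col => PySem.Str.startswith col "Q410" && PySem.Str.endswith col "G_Reb")
  let q800 := data.filter (fun col => PySem.Str.startswith col "Q800" && PySem.Str.endswith col "G_Reb")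
  let rolled_cols := if with_pulse then ["Pulse_G_Reb"] ++ q320 ++ q215 ++ q410 ++ q800
                     else q320 ++ q215 ++ q410 ++ q800
  let oq320 := data.filter (fun col => PySem.Str.startswith col "orig_q320" && PySem.Str.endswith col "g_reb")
  let oq215 := data.filter (fun col => PySem.Str.startswith col "orig_q215" && PySem.Str.endswith col "g_reb")
  let oq410 := data.filter (fun col => PySem.Str.startswith col "orig_q410" && PySem.Str.endswith col "g_reb")
  let oq800 := data.filter (fun col => PySem.Str.startswith col "orig_q800" && PySem.Str.endswith col "g_reb")
  let unrolled_cols := if with_pulse then ["orig_pulse_g_reb"] ++ oq320 ++ oq215 ++ oq410 ++ oq800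
                       else oq320 ++ oq215 ++ oq410 ++ oq800
  (rolled_cols, unrolled_cols)

-- ===== PORT B =====
-- _collect from Source B: append col to the bucket when it matches prefix/suffix
def pvCollect (bucket : List String) (col : String) (prefix_ suffix_ : String) : List String :=
  if PySem.Str.startswith col prefix_ && PySem.Str.endswith col suffix_ then bucket ++ [col] else bucket

-- one iteration of Source B's loop body over the eight buckets
def pvStep :
    (List String × List String × List String × List String ×
     List String × List String × List String × List String) → String →
    (List String × List String × List String × List String ×
     List String × List String × List String × List String)
  | (q320, q215, q410, q800, oq320, oq215, oq410, oq800), col =>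
    (pvCollect q320 col "Q320" "G_Reb",
     pvCollect q215 col "Q215" "G_Reb",
     pvCollect q410 col "Q410" "G_Reb",
     pvCollect q800 col "Q800" "G_Reb",
     pvCollect oq320 col "orig_q320" "g_reb",
     pvCollect oq215 col "orig_q215" "g_reb",
     pvCollect oq410 col "orig_q410" "g_reb",
     pvCollect oq800 col "orig_q800" "g_reb")

def get_rolled_unrolled_cols_alt (data : List String) (with_pulse : Bool) : List String × List String :=
  match data.foldl pvStep ([], [], [], [], [], [], [], []) with
  | (q320, q215, q410, q800, oq320, oq215, oq410, oq800) =>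
    ((if with_pulse then ["Pulse_G_Reb"] else []) ++ q320 ++ q215 ++ q410 ++ q800,
     (if with_pulse then ["orig_pulse_g_reb"] else []) ++ oq320 ++ oq215 ++ oq410 ++ oq800)

-- ===== PRECONDITION & SPEC =====
def Spec_get_rolled_unrolled_cols (data : List String) (with_pulse : Bool) (out : List String × List String) : Prop := out = get_rolled_unrolled_cols_alt data with_pulse
instance (data : List String) (with_pulse : Bool) (out : List String × List String) : Decidable (Spec_get_rolled_unrolled_cols data with_pulse out) := by unfold Spec_get_rolled_unrolled_cols; infer_instance

-- ===== CLAIM (what is proved, stated in full; the proofs are below) =====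
def Claim_equal_get_rolled_unrolled_cols : Prop := ∀ (data : List String) (with_pulse : Bool), Dom_get_rolled_unrolled_cols data with_pulse → Spec_get_rolled_unrolled_cols data with_pulse (get_rolled_unrolled_cols data with_pulse)

-- ===== LEMMAS AND PROOFS =====
-- appending via pvCollect then a filtered tail = the accumulator plus the filter over col :: tail
lemma pvCollect_filter (p s : String) (b : List String) (c : String) (l : List String) :
    pvCollect b c p s ++ l.filter (fun col => PySem.Str.startswith col p && PySem.Str.endswith col s) =
    b ++ (c :: l).filter (fun col => PySem.Str.startswith col p && PySem.Str.endswith col s) := by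
  cases h : (PySem.Str.startswith c p && PySem.Str.endswith c s) <;>
    simp only [pvCollect, List.filter_cons, h] <;> simp

-- the whole loop computes, per bucket, accumulator ++ filter
lemma foldl_pvStep (l : List String) :
    ∀ a b c d e f g h,
      l.foldl pvStep (a, b, c, d, e, f, g, h) =
      (a ++ l.filter (fun col => PySem.Str.startswith col "Q320" && PySem.Str.endswith col "G_Reb"),
       b ++ l.filter (fun col => PySem.Str.startswith col "Q215" && PySem.Str.endswith col "G_Reb"),
       c ++ l.filter (fun col => PySem.Str.startswith col "Q410" && PySem.Str.endswith col "G_Reb"),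
       d ++ l.filter (fun col => PySem.Str.startswith col "Q800" && PySem.Str.endswith col "G_Reb"),
       e ++ l.filter (fun col => PySem.Str.startswith col "orig_q320" && PySem.Str.endswith col "g_reb"),
       f ++ l.filter (fun col => PySem.Str.startswith col "orig_q215" && PySem.Str.endswith col "g_reb"),
       g ++ l.filter (fun col => PySem.Str.startswith col "orig_q410" && PySem.Str.endswith col "g_reb"),
       h ++ l.filter (fun col => PySem.Str.startswith col "orig_q800" && PySem.Str.endswith col "g_reb")) := by
  induction l with
  | nil => intro a b c d e f g h; simp
  | cons x xs ih =>
    intro a b c d e f g h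
    simp only [List.foldl_cons, pvStep, ih]
    refine Prod.ext ?_ (Prod.ext ?_ (Prod.ext ?_ (Prod.ext ?_ (Prod.ext ?_ (Prod.ext ?_ (Prod.ext ?_ ?_)))))) <;>
      exact pvCollect_filter _ _ _ _ _

-- ===== VERDICT (by name: the statement is the Claim_ definition above) =====
theorem get_rolled_unrolled_cols_spec : Claim_equal_get_rolled_unrolled_cols := by
  intro data with_pulse _
  unfold Spec_get_rolled_unrolled_cols get_rolled_unrolled_cols get_rolled_unrolled_cols_alt
  rw [foldl_pvStep]
  cases with_pulse <;> simp
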